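-- pv_equiv track=rewrite | github.com/MrHamdulay/csc3-capstone | examples/data/Assignment_8/khnyus005/question2.py | rep_count
-- ===== SOURCE A (Python) =====
-- def rep_count(message):
--     if message[-1::]=='':
--         return 0#if string empty, stop recursion
--     if message[-1]==message[-2:-1:]:#compares last two chars
--         message = message[0:-2:1]#remove last char from string
--         return (1+rep_count(message))#add repetition to count
--     else:
--         message = message[0:-1:1]#if no adjacent repeated letters
--         return (0+rep_count(message))#remove last letter and add zero to count
-- ===== SOURCE B (Python) =====
-- def rep_count(message):
--     count = 0
--     i = len(message) - 1
--     while i > 0: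
--         if message[i] == message[i - 1]:
--             count += 1
--             i -= 2
--         else:
--             i -= 1
--     return count
-- ===== Notes on version B (the rewrite author's own statement) =====
-- stated objective: faster
-- what changed: Replaced A's recursion that rebuilds the string by slicing at every step with a single backward index scan (skip 2 on a match, 1 otherwise) keeping only an index and a counter.
import Mathlib
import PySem

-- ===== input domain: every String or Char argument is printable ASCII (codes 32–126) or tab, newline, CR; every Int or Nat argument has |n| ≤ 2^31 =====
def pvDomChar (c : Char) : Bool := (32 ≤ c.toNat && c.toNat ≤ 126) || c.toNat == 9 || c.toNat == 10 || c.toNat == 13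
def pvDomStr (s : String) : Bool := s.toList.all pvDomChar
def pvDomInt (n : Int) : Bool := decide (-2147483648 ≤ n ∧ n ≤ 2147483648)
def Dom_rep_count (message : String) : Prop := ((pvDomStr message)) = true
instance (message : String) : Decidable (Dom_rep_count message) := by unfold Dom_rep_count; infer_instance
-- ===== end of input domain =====

-- B replaces A's slice-rebuilding recursion by a single backward index scan (faster).

-- ===== PORT A =====
-- literal transliteration of A's recursion on the string's character list
def repA (l : List Char) : Int :=
  if h : PySem.List.slice l (some (-1)) none = ([] : List Char) then 0
  else
    match PySem.List.pyGet? l (-1) with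
    | none => 0   -- unreachable: guarded by the emptiness test above
    | some c =>
      if [c] = PySem.List.slice l (some (-2)) (some (-1)) then
        1 + repA (PySem.List.slice l (some 0) (some (-2)))
      else
        0 + repA (PySem.List.slice l (some 0) (some (-1)))
termination_by l.length
decreasing_by
  all_goals
    rw [PySem.List.slice_from_neg_one] at h
    have hne : l ≠ [] := by intro hl; simp [hl] at h
    have hpos : 0 < l.length := List.length_pos_iff.mpr hne
  · simp only [PySem.List.slice_zero_start]
    rw [PySem.List.slice_to_neg_ofNat l 2 (by omega)]
    simp [List.length_take]; omega
  · simp only [PySem.List.slice_zero_start]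
    rw [PySem.List.slice_to_neg_one]
    simp [List.length_dropLast]; omega

def rep_count (message : String) : Int := repA message.toList

-- ===== PORT B =====
-- backward scan: index i counts down, skipping 2 on a match (count+1) and 1 otherwise
def goB (l : List Char) : Nat → Int
  | 0 => 0
  | i + 1 =>
    if l.getD (i + 1) ' ' = l.getD i ' ' then 1 + goB l (i - 1)
    else goB l i

def rep_count_alt (message : String) : Int :=
  goB message.toList (message.toList.length - 1)

-- ===== PRECONDITION & SPEC =====
def Spec_rep_count (message : String) (out : Int) : Prop := out = rep_count_alt message
instance (message : String) (out : Int) : Decidable (Spec_rep_count message out) := by unfold Spec_rep_count; infer_instance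

-- ===== CLAIM (what is proved, stated in full; the proofs are below) =====
def Claim_equal_rep_count : Prop := ∀ (message : String), Dom_rep_count message → Spec_rep_count message (rep_count message)

-- ===== LEMMAS AND PROOFS =====

-- goB only looks at indices ≤ the current one, so truncating the list above them changes nothing
theorem goB_take (l : List Char) (m : Nat) :
    ∀ j, j = 0 ∨ j < m → goB (l.take m) j = goB l j := by
  intro j
  induction j using Nat.strong_induction_on with
  | _ j ih =>
    intro hj
    cases j with
    | zero => simp [goB]
    | succ i =>
      have hm : i + 1 < m := by omega
      have hm' : i < m := by omega
      have h1 : (l.take m).getD (i + 1) ' ' = l.getD (i + 1) ' ' := by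
        simp [List.getD, List.getElem?_take, hm]
      have h2 : (l.take m).getD i ' ' = l.getD i ' ' := by
        simp [List.getD, List.getElem?_take, hm']
      simp only [goB, h1, h2]
      split
      · rw [ih (i - 1) (by omega) (by omega)]
      · rw [ih i (by omega) (by omega)]

theorem repA_eq (l : List Char) : repA l = goB l (l.length - 1) := by
  induction hn : l.length using Nat.strong_induction_on generalizing l with
  | _ n ih =>
  rcases hr : l.reverse with _ | ⟨x, rest⟩
  · have hl : l = [] := by simpa using congrArg List.reverse hr
    subst hl
    obtain rfl : n = 0 := by simpa using hn.symm
    rw [repA, dif_pos (by rw [PySem.List.slice_from_neg_one]; rfl)]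
    simp [goB]
  · rcases rest with _ | ⟨y, r⟩
    · have hl : l = [x] := by
        have := congrArg List.reverse hr; simpa using this
      subst hl
      rw [repA]
      rw [dif_neg (by rw [PySem.List.slice_from_neg_one]; simp)]
      have hget : PySem.List.pyGet? [x] (-1) = some x := by
        simp [PySem.List.pyGet?, PySem.List.pyIdx?]
      have hprev : PySem.List.slice [x] (some (-2)) (some (-1)) = ([] : List Char) := by
        simp [PySem.List.slice, PySem.List.clampIdx]
      have htake : PySem.List.slice [x] (some 0) (some (-1)) = ([] : List Char) := by
        simp only [PySem.List.slice_zero_start]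
        rw [PySem.List.slice_to_neg_one]; rfl
      obtain rfl : n = 1 := by simpa using hn.symm
      simp only [hget, hprev, htake, reduceCtorEq, if_false]
      rw [repA, dif_pos (by rw [PySem.List.slice_from_neg_one]; rfl)]
      simp [goB]
    · -- l = s ++ [y, x] with s := r.reverse
      have hl : l = r.reverse ++ [y, x] := by
        have := congrArg List.reverse hr; simpa using this
      subst hl
      set s := r.reverse with hs
      have hlen : (s ++ [y, x]).length = s.length + 2 := by simp
      have hx : (s ++ [y, x]).getD (s.length + 1) ' ' = x := by
        simp [List.getD, List.getElem?_append_right]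
      have hy : (s ++ [y, x]).getD s.length ' ' = y := by
        simp [List.getD, List.getElem?_append_right]
      have hdrop : PySem.List.slice (s ++ [y, x]) (some (-1)) none = [x] := by
        rw [PySem.List.slice_from_neg_one, hlen]
        rw [show s.length + 2 - 1 = (s ++ [y]).length by simp,
            show s ++ [y, x] = (s ++ [y]) ++ [x] by simp]
        exact List.drop_left
      have hget : PySem.List.pyGet? (s ++ [y, x]) (-1) = some x := by
        simp [PySem.List.pyGet?, PySem.List.pyIdx?, List.getElem?_append_right]
      have hprev : PySem.List.slice (s ++ [y, x]) (some (-2)) (some (-1)) = [y] := by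
        simp [PySem.List.slice]
      have htake2 : PySem.List.slice (s ++ [y, x]) (some 0) (some (-2)) = s := by
        simp only [PySem.List.slice_zero_start]
        rw [PySem.List.slice_to_neg_ofNat _ 2 (by omega), hlen]
        simp
      have htake1 : PySem.List.slice (s ++ [y, x]) (some 0) (some (-1)) = s ++ [y] := by
        simp only [PySem.List.slice_zero_start]
        rw [PySem.List.slice_to_neg_one]
        rw [show s ++ [y, x] = (s ++ [y]) ++ [x] by simp]
        simp
      obtain rfl : n = s.length + 2 := by rw [← hn, hlen]
      rw [repA]
      rw [dif_neg (by rw [hdrop]; simp)]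
      simp only [hget, hprev]
      rw [show s.length + 2 - 1 = s.length + 1 from rfl]
      simp only [goB, hx, hy]
      by_cases hxy : x = y
      · rw [if_pos (by simp [hxy]), if_pos hxy]
        have e1 : repA s = goB s (s.length - 1) :=
          ih s.length (by omega) s rfl
        have e2 : goB (s ++ [y, x]) (s.length - 1) = goB s (s.length - 1) := by
          have h := goB_take (s ++ [y, x]) s.length (s.length - 1) (by omega)
          rw [List.take_left] at h
          exact h.symm
        rw [htake2, e1, e2]
      · rw [if_neg (by simp [hxy]), if_neg hxy]
        have e1 : repA (s ++ [y]) = goB (s ++ [y]) ((s ++ [y]).length - 1) :=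
          ih (s ++ [y]).length (by simp) (s ++ [y]) rfl
        have e2 : goB (s ++ [y, x]) s.length = goB (s ++ [y]) s.length := by
          have h := goB_take ((s ++ [y]) ++ [x]) (s ++ [y]).length s.length (by simp)
          rw [List.take_left] at h
          rw [show s ++ [y, x] = (s ++ [y]) ++ [x] by simp]
          exact h.symm
        rw [htake1, e1, e2]
        simp

-- ===== VERDICT (by name: the statement is the Claim_ definition above) =====
theorem rep_count_spec : Claim_equal_rep_count := by
  intro message _
  unfold Spec_rep_count rep_count rep_count_alt
  exact repA_eq _
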